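-- pv_equiv track=rewrite | github.com/GundalaNikhil/DSA | dsa-problems/Bitwise/test_all_16_comprehensive.py | bit_014_solution
-- ===== SOURCE A (Python) =====
-- def bit_014_solution(n):
--     count = 0
--     # Generate all n-bit numbers and check palindrome + balanced ones
--     for num in range(1 << n):
--         binary = bin(num)[2:].zfill(n)
--         # Check if palindrome
--         if binary == binary[::-1]:
--             # Check if balanced (equal 0s and 1s)
--             if binary.count('0') == binary.count('1'):
--                 count += 1
--     return count
-- ===== SOURCE B (Python) =====
-- from math import comb
--
-- def bit_014_solution(n):
--     # A balanced palindromic n-bit string is determined by its first half,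
--     # which must have exactly n/4 ones; possible only when 4 divides n.
--     return comb(n // 2, n // 4) if n >= 0 and n % 4 == 0 else 0
-- ===== Notes on version B (the rewrite author's own statement) =====
-- stated objective: faster
-- what changed: Replaces the enumeration of all n-bit strings with the closed-form binomial count C(n/2, n/4) when n is divisible by four (else zero), justified by the bijection between balanced palindromes and their half-strings; intended as faster — a timing run saw A time out on larger sizes where B still returned, so it could not confirm a ratio.
-- intended difference: For n = 0 A returns 0 because bin(0) yields the one-character string '0' which is not balanced, while B returns one, the intended count since the empty string is the unique balanced palindromic 0-bit string. — e.g. on bit_014_solution(0): A returns 0, B returns 1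
import Mathlib
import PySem

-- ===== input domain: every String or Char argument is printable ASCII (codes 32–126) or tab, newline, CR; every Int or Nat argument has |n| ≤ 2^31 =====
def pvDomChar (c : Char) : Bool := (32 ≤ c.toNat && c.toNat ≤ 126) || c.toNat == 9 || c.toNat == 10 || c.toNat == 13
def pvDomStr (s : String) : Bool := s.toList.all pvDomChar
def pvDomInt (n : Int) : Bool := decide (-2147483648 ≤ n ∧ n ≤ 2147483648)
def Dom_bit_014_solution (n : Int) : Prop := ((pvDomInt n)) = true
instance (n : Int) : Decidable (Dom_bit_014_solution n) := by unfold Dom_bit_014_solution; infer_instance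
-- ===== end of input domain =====

-- B replaces A's enumeration of all 2^n strings by the closed form C(n/2, n/4) when 4 | n, else 0
-- (intended as faster; a timing run saw A time out where B returned, so no ratio was measured).

-- ===== PORT A =====
-- hand port of bin(num)[2:] for num ≥ 1: most-significant-first binary digits (exact for positive ints)
def pvBinAux : Nat → List Char
  | 0 => []
  | n+1 => pvBinAux ((n+1)/2) ++ [if (n+1) % 2 = 1 then '1' else '0']
decreasing_by exact Nat.div_lt_self (Nat.succ_pos n) (by norm_num)

-- hand port of bin(num)[2:] for num ≥ 0 (bin(0)[2:] = "0")
def pvBinChars (num : Nat) : List Char := if num = 0 then ['0'] else pvBinAux num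

-- hand port of str.zfill for sign-free strings: pad with '0' on the left to length n (exact here)
def pvZfill (n : Nat) (s : List Char) : List Char := List.replicate (n - s.length) '0' ++ s

-- Python strings are represented as List Char; the 0 ≤ n guard covers the ValueError of 1 << n for n < 0
def bit_014_solution (n : Int) : Int :=
  if 0 ≤ n then
    (List.range (2 ^ n.toNat)).foldl (fun count num =>
      let binary := pvZfill n.toNat (pvBinChars num)
      if binary = binary.reverse ∧ binary.count '0' = binary.count '1'
      then count + 1 else count) 0
  else 0

-- ===== PORT B =====
def bit_014_solution_alt (n : Int) : Int :=
  if 0 ≤ n ∧ n % 4 = 0 then ((n.toNat / 2).choose (n.toNat / 4) : Int) else 0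

-- ===== PRECONDITION & SPEC =====
-- Python A raises ValueError (negative shift count) for n < 0
def Pre_bit_014_solution (n : Int) : Prop := 0 ≤ n
instance (n : Int) : Decidable (Pre_bit_014_solution n) := by unfold Pre_bit_014_solution; infer_instance
def pvWitness_bit_014_solution : Int := 4

-- For n = 0 A returns 0 because bin(0) yields the one-character string "0" (not balanced), while B
-- returns 1, the intended count: the empty string is the unique balanced palindromic 0-bit string.
def D_bit_014_solution (n : Int) : Prop := n = 0
instance (n : Int) : Decidable (D_bit_014_solution n) := by unfold D_bit_014_solution; infer_instance
def Spec_bit_014_solution (n : Int) (out : Int) : Prop := ¬ D_bit_014_solution n → out = bit_014_solution_alt n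
instance (n : Int) (out : Int) : Decidable (Spec_bit_014_solution n out) := by unfold Spec_bit_014_solution; infer_instance
def pvDiffWitness_bit_014_solution : Int := 0
def pvDiffWitnessOut_bit_014_solution : Int × Int := (0, 1)

-- ===== CLAIM (what is proved, stated in full; the proofs are below) =====
def Claim_unchanged_bit_014_solution : Prop := ∀ (n : Int), Dom_bit_014_solution n → Pre_bit_014_solution n → Spec_bit_014_solution n (bit_014_solution n)
def Claim_changed_bit_014_solution : Prop := Dom_bit_014_solution (pvDiffWitness_bit_014_solution) ∧ Pre_bit_014_solution (pvDiffWitness_bit_014_solution) ∧ D_bit_014_solution (pvDiffWitness_bit_014_solution) ∧ bit_014_solution (pvDiffWitness_bit_014_solution) = pvDiffWitnessOut_bit_014_solution.1 ∧ bit_014_solution_alt (pvDiffWitness_bit_014_solution) = pvDiffWitnessOut_bit_014_solution.2 ∧ pvDiffWitnessOut_bit_014_solution.1 ≠ pvDiffWitnessOut_bit_014_solution.2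
def Claim_exact_bit_014_solution : Prop := ∀ (n : Int), Dom_bit_014_solution n → Pre_bit_014_solution n → D_bit_014_solution n → bit_014_solution n ≠ bit_014_solution_alt n

-- ===== LEMMAS AND PROOFS =====

-- the list of all {'0','1'}-strings of length N, in A's enumeration order
def allStrings : Nat → List (List Char)
  | 0 => [[]]
  | n+1 => (allStrings n).map (fun l => '0' :: l) ++ (allStrings n).map (fun l => '1' :: l)

theorem length_binAux_le : ∀ (N num : Nat), num < 2 ^ N → (pvBinAux num).length ≤ N := by
  intro N
  induction N with
  | zero => intro num h; interval_cases num; simp [pvBinAux]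
  | succ N ih =>
    intro num h
    match num with
    | 0 => simp [pvBinAux]
    | m+1 =>
      rw [pvBinAux, List.length_append]
      have hp : 2 ^ (N+1) = 2 * 2 ^ N := by ring
      have := ih ((m+1)/2) (by omega)
      simp only [List.length_cons, List.length_nil]
      omega

theorem zfill_cons_zero (N : Nat) (s : List Char) (h : s.length ≤ N) :
    pvZfill (N+1) s = '0' :: pvZfill N s := by
  unfold pvZfill
  rw [show N + 1 - s.length = (N - s.length) + 1 by omega, List.replicate_succ, List.cons_append]

theorem zfill_eq_self (N : Nat) (s : List Char) (h : s.length = N) : pvZfill N s = s := by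
  unfold pvZfill; rw [h]; simp

theorem length_zfill (N : Nat) (s : List Char) (h : s.length ≤ N) : (pvZfill N s).length = N := by
  unfold pvZfill; simp; omega

theorem zfill_step (N r : Nat) :
    pvZfill (N+1) (pvBinAux r) = pvZfill N (pvBinAux (r/2)) ++ [if r % 2 = 1 then '1' else '0'] := by
  match r with
  | 0 => simp [pvBinAux, pvZfill, List.replicate_succ']
  | m+1 =>
    rw [pvBinAux]
    unfold pvZfill
    rw [List.length_append]
    simp only [List.length_cons, List.length_nil]
    rw [show N + 1 - ((pvBinAux ((m+1)/2)).length + (0 + 1)) = N - (pvBinAux ((m+1)/2)).length by omega,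
      ← List.append_assoc]

theorem binAux_pow_add : ∀ (N r : Nat), r < 2 ^ N → pvBinAux (2 ^ N + r) = '1' :: pvZfill N (pvBinAux r) := by
  intro N
  induction N with
  | zero =>
    intro r h; interval_cases r
    show pvBinAux (0+1) = '1' :: pvZfill 0 (pvBinAux 0)
    rw [pvBinAux]
    simp [pvBinAux, pvZfill]
  | succ N ih =>
    intro r h
    have hp : 2 ^ (N+1) = 2 * 2 ^ N := by ring
    have hpos : 1 ≤ 2 ^ N := Nat.one_le_two_pow
    obtain ⟨k, hk⟩ : ∃ k, 2 ^ (N+1) + r = k + 1 := ⟨2 ^ (N+1) + r - 1, by omega⟩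
    rw [hk, pvBinAux]
    have hdiv : (k+1)/2 = 2 ^ N + r/2 := by omega
    have hmod : (k+1) % 2 = r % 2 := by omega
    rw [hdiv, hmod, ih (r/2) (by omega), zfill_step, List.cons_append]

theorem enum : ∀ (N : Nat),
    (List.range (2 ^ N)).map (fun num => pvZfill N (pvBinAux num)) = allStrings N := by
  intro N
  induction N with
  | zero => simp [pvZfill, pvBinAux, allStrings]
  | succ N ih =>
    have hp : 2 ^ (N+1) = 2 ^ N + 2 ^ N := by ring
    rw [hp, List.range_add, List.map_append, List.map_map]
    show _ = allStrings (N+1)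
    rw [allStrings, ← ih, List.map_map, List.map_map]
    congr 1
    · apply List.map_congr_left
      intro num hnum
      rw [List.mem_range] at hnum
      exact zfill_cons_zero N _ (length_binAux_le N num hnum)
    · apply List.map_congr_left
      intro r hr
      rw [List.mem_range] at hr
      simp only [Function.comp]
      rw [binAux_pow_add N r hr]
      exact zfill_eq_self _ _ (by
        simp only [List.length_cons, length_zfill N _ (length_binAux_le N r hr)])

theorem mem_allStrings : ∀ (N : Nat) (l : List Char),
    l ∈ allStrings N ↔ (l.length = N ∧ ∀ c ∈ l, c = '0' ∨ c = '1') := by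
  intro N
  induction N with
  | zero =>
    intro l
    simp only [allStrings, List.mem_singleton]
    constructor
    · rintro rfl; simp
    · rintro ⟨h, -⟩; exact List.length_eq_zero_iff.mp h
  | succ N ih =>
    intro l
    simp only [allStrings, List.mem_append, List.mem_map, ih]
    constructor
    · rintro (⟨a, ⟨hlen, hch⟩, rfl⟩ | ⟨a, ⟨hlen, hch⟩, rfl⟩) <;>
        refine ⟨by simp [hlen], fun c hc => ?_⟩ <;>
        rcases List.mem_cons.mp hc with rfl | hc'
      · left; rfl
      · exact hch c hc'
      · right; rfl
      · exact hch c hc'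
    · rintro ⟨hlen, hch⟩
      match l with
      | [] => simp at hlen
      | c :: t =>
        have ht : t.length = N ∧ ∀ x ∈ t, x = '0' ∨ x = '1' :=
          ⟨by simpa using hlen, fun x hx => hch x (List.mem_cons_of_mem _ hx)⟩
        rcases hch c List.mem_cons_self with rfl | rfl
        · exact Or.inl ⟨t, ht, rfl⟩
        · exact Or.inr ⟨t, ht, rfl⟩

theorem nodup_allStrings : ∀ (N : Nat), (allStrings N).Nodup := by
  intro N
  induction N with
  | zero => simp [allStrings]
  | succ N ih =>
    rw [allStrings]
    apply List.Nodup.append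
    · exact List.Nodup.map (fun a b h => by injection h) ih
    · exact List.Nodup.map (fun a b h => by injection h) ih
    · intro l hl hr
      simp only [List.mem_map] at hl hr
      obtain ⟨a, -, ha⟩ := hl
      obtain ⟨b, -, hb⟩ := hr
      rw [← ha] at hb
      injection hb with h1 _
      exact absurd h1 (by decide)

theorem count_binary : ∀ (h : List Char), (∀ c ∈ h, c = '0' ∨ c = '1') →
    h.count '0' + h.count '1' = h.length := by
  intro h
  induction h with
  | nil => simp
  | cons c t ih =>
    intro hc
    have hct := ih (fun x hx => hc x (List.mem_cons_of_mem _ hx))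
    rcases hc c List.mem_cons_self with rfl | rfl <;>
      simp <;> omega

theorem pal_filter_perm (m : Nat) :
    ((allStrings (m+m)).filter fun l => decide (l = l.reverse)).Perm
      ((allStrings m).map fun h => h ++ h.reverse) := by
  rw [List.perm_ext_iff_of_nodup ((nodup_allStrings _).filter _)
    (List.Nodup.map (fun a b hab => by
      have hl : a.length = b.length := by
        have := congrArg List.length hab; simp at this; omega
      exact (List.append_inj hab hl).1) (nodup_allStrings m))]
  intro l
  simp only [List.mem_filter, List.mem_map, mem_allStrings, decide_eq_true_eq]
  constructor
  · rintro ⟨⟨hlen, hch⟩, hpal⟩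
    refine ⟨l.take m, ⟨by simp [List.length_take, hlen], fun c hc => hch c (List.mem_of_mem_take hc)⟩, ?_⟩
    have h1 : (l.take m).length = m := by simp [List.length_take, hlen]
    have h2 : (l.drop m).length = m := by simp [hlen]
    have hsplit : l.take m ++ l.drop m = (l.drop m).reverse ++ (l.take m).reverse := by
      rw [List.take_append_drop, ← List.reverse_append, List.take_append_drop, ← hpal]
    obtain ⟨hA, -⟩ := List.append_inj hsplit (by rw [h1, List.length_reverse, h2])
    conv_rhs => rw [← List.take_append_drop m l]
    rw [hA]
    simp
  · rintro ⟨h, ⟨hlen, hch⟩, rfl⟩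
    refine ⟨⟨by simp [hlen], fun c hc => ?_⟩, by simp⟩
    rcases List.mem_append.mp hc with h' | h'
    · exact hch c h'
    · exact hch c (List.mem_reverse.mp h')

theorem choose_count : ∀ (m k : Nat),
    ((allStrings m).countP fun h => decide (h.count '1' = k)) = m.choose k := by
  intro m
  induction m with
  | zero =>
    intro k
    match k with
    | 0 => simp [allStrings]
    | k+1 => simp [allStrings]
  | succ m ih =>
    intro k
    rw [allStrings, List.countP_append, List.countP_map, List.countP_map]
    have e0 : ((fun h : List Char => decide (h.count '1' = k)) ∘ fun l => '0' :: l)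
        = fun h : List Char => decide (h.count '1' = k) := by
      funext h; simp [Function.comp]
    have e1 : ((fun h : List Char => decide (h.count '1' = k)) ∘ fun l => '1' :: l)
        = fun h : List Char => decide (h.count '1' + 1 = k) := by
      funext h; simp [Function.comp]
    rw [e0, e1]
    match k with
    | 0 =>
      rw [ih 0, List.countP_eq_zero.mpr (by intro a _; simp)]
      simp
    | k+1 =>
      have e2 : (fun h : List Char => decide (h.count '1' + 1 = k + 1))
          = fun h : List Char => decide (h.count '1' = k) := by
        funext h; simp
      rw [e2, ih (k+1), ih k, Nat.choose_succ_succ']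
      omega

theorem countQ (N : Nat) :
    ((allStrings N).countP fun l => decide (l = l.reverse ∧ l.count '0' = l.count '1'))
      = if N % 4 = 0 then (N / 2).choose (N / 4) else 0 := by
  rcases Nat.even_or_odd N with ⟨m, hm⟩ | ⟨m, hm⟩
  · -- N = m + m
    subst hm
    have hsplit : ((allStrings (m+m)).countP fun l => decide (l = l.reverse ∧ l.count '0' = l.count '1'))
        = ((allStrings (m+m)).filter fun l => decide (l = l.reverse)).countP
            fun l => decide (l.count '0' = l.count '1') := by
      rw [List.countP_filter]
      apply List.countP_congr
      intro l _
      simp [and_comm]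
    rw [hsplit, (pal_filter_perm m).countP_eq, List.countP_map]
    have e3 : ((fun l : List Char => decide (l.count '0' = l.count '1')) ∘ fun h => h ++ h.reverse)
        = fun h : List Char => decide (h.count '0' = h.count '1') := by
      funext h
      simp [Function.comp, List.count_append, List.count_reverse]
      omega
    rw [e3]
    have hcong : ((allStrings m).countP fun h : List Char => decide (h.count '0' = h.count '1'))
        = (allStrings m).countP fun h : List Char => decide (h.count '1' + h.count '1' = m) := by
      apply List.countP_congr
      intro h hh
      obtain ⟨hlen, hch⟩ := (mem_allStrings m h).mp hh
      have := count_binary h hch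
      simp only [decide_eq_true_eq]
      omega
    rw [hcong]
    rcases Nat.even_or_odd m with ⟨q, hq⟩ | ⟨q, hq⟩
    · subst hq
      have e4 : (fun h : List Char => decide (h.count '1' + h.count '1' = q + q))
          = fun h : List Char => decide (h.count '1' = q) := by
        funext h; simp only [decide_eq_decide]; omega
      rw [e4, choose_count]
      have h4 : (q + q + (q + q)) % 4 = 0 := by omega
      rw [if_pos h4]
      congr 1 <;> omega
    · rw [List.countP_eq_zero.mpr (by intro a _; simp only [decide_eq_true_eq]; omega),
        if_neg (by omega)]
  · -- N odd: no balanced string exists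
    subst hm
    rw [List.countP_eq_zero.mpr, if_neg (by omega)]
    intro l hl
    obtain ⟨hlen, hch⟩ := (mem_allStrings _ l).mp hl
    have := count_binary l hch
    simp only [decide_eq_true_eq, not_and]
    intro _
    omega

theorem zfill_zero_char (N : Nat) (h : 1 ≤ N) : pvZfill N ['0'] = pvZfill N [] := by
  obtain ⟨M, rfl⟩ : ∃ M, N = M + 1 := ⟨N - 1, by omega⟩
  unfold pvZfill
  simp [List.replicate_succ']

theorem main_eq (n : Int) (h1 : 1 ≤ n) : bit_014_solution n = bit_014_solution_alt n := by
  have hn0 : 0 ≤ n := by omega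
  have hN1 : 1 ≤ n.toNat := by omega
  unfold bit_014_solution bit_014_solution_alt
  rw [if_pos hn0]
  have hfold : ∀ (l : List Nat) (c : Int),
      l.foldl (fun count num =>
        let binary := pvZfill n.toNat (pvBinChars num)
        if binary = binary.reverse ∧ binary.count '0' = binary.count '1'
        then count + 1 else count) c
      = c + (l.countP fun num =>
          decide (pvZfill n.toNat (pvBinChars num) = (pvZfill n.toNat (pvBinChars num)).reverse ∧
            (pvZfill n.toNat (pvBinChars num)).count '0' = (pvZfill n.toNat (pvBinChars num)).count '1')) := by
    intro l
    induction l with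
    | nil => intro c; simp
    | cons x t ih =>
      intro c
      rw [List.foldl_cons, List.countP_cons, ih]
      by_cases hx : pvZfill n.toNat (pvBinChars x) = (pvZfill n.toNat (pvBinChars x)).reverse ∧
          (pvZfill n.toNat (pvBinChars x)).count '0' = (pvZfill n.toNat (pvBinChars x)).count '1'
      · simp only [if_pos hx, decide_eq_true hx]
        push_cast; ring
      · simp only [if_neg hx, decide_eq_false hx]
        push_cast; ring
  rw [hfold, zero_add]
  have hbc : ∀ num : Nat, pvZfill n.toNat (pvBinChars num) = pvZfill n.toNat (pvBinAux num) := by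
    intro num
    unfold pvBinChars
    split_ifs with h
    · subst h
      rw [pvBinAux]
      exact zfill_zero_char n.toNat hN1
    · rfl
  simp only [hbc]
  rw [show (List.countP (fun num =>
        decide (pvZfill n.toNat (pvBinAux num) = (pvZfill n.toNat (pvBinAux num)).reverse ∧
          (pvZfill n.toNat (pvBinAux num)).count '0' = (pvZfill n.toNat (pvBinAux num)).count '1'))
        (List.range (2 ^ n.toNat)))
      = ((allStrings n.toNat).countP fun l => decide (l = l.reverse ∧ l.count '0' = l.count '1'))
    from by rw [← enum n.toNat, List.countP_map]; rfl]
  rw [countQ]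
  by_cases h4 : n % 4 = 0
  · have h4' : n.toNat % 4 = 0 := by omega
    rw [if_pos h4', if_pos ⟨hn0, h4⟩]
  · have h4' : ¬ n.toNat % 4 = 0 := by omega
    rw [if_neg h4', if_neg (by tauto)]
    rfl

-- ===== VERDICT (by name: the statement is the Claim_ definition above) =====
theorem bit_014_solution_spec : Claim_unchanged_bit_014_solution := by
  intro n _ hPre hD
  unfold D_bit_014_solution at hD
  unfold Pre_bit_014_solution at hPre
  exact main_eq n (by omega)

theorem bit_014_solution_changed : Claim_changed_bit_014_solution := by
  unfold Claim_changed_bit_014_solution; decide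

theorem bit_014_solution_tight : Claim_exact_bit_014_solution := by
  intro n _ _ hD
  unfold D_bit_014_solution at hD
  subst hD; decide
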